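-- pv_equiv track=rewrite | github.com/ChenF221/Teoria-de-la-computacion | Bloque_1/paridad/tablero.py | combinacionesRutas
-- ===== SOURCE A (Python) =====
-- tablaEstados = {
--     1: {'r': [2, 4], 'b': [5]},
--     2: {'r': [4, 6], 'b': [1, 3, 5]},
--     3: {'r': [2, 6], 'b': [5]},
--     4: {'r': [2, 8], 'b': [1, 5, 7]},
--     5: {'r': [2, 4, 6, 8], 'b': [1, 3, 7, 9]},
--     6: {'r': [2, 8], 'b': [3, 5, 9]},
--     7: {'r': [4, 8], 'b': [5]},
--     8: {'r': [4, 6], 'b': [5, 7, 9]},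
--     9: {'r': [6, 8], 'b': [5]}
-- }
--
-- def combinacionesRutas(inicio, ruta):
--     if not ruta:
--         return [(inicio,)]
--
--     primero, *nueva_ruta = ruta
--     combinaciones = []
--     for estado in tablaEstados[inicio][primero]:
--         combinaciones.extend([(inicio,) + r for r in combinacionesRutas(estado, nueva_ruta)])
--     return combinaciones
-- ===== SOURCE B (Python) =====
-- def combinacionesRutas(inicio, ruta):
--     # The transition table is exactly king-move adjacency on the 3x3 board
--     # (squares 1..9) restricted by parity: 'r' reaches the adjacent even
--     # squares, 'b' the adjacent odd ones, in ascending order.  So compute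
--     # moves arithmetically and expand an iterative frontier, no table.
--     paridad = {'r': 0, 'b': 1}
--     frontier = [(inicio,)]
--     for color in ruta:
--         want = paridad[color]
--         nuevo = []
--         for p in frontier:
--             s = p[-1]
--             fila, col = divmod(s - 1, 3)
--             for n in range(1, 10):
--                 f2, c2 = divmod(n - 1, 3)
--                 if n % 2 == want and n != s and abs(f2 - fila) <= 1 and abs(c2 - col) <= 1:
--                     nuevo.append(p + (n,))
--         frontier = nuevo
--     return frontier
-- ===== Notes on version B (the rewrite author's own statement) =====
-- stated objective: alternative
-- what changed: B eliminates the hard-coded transition table entirely, computing each move arithmetically (king-adjacency on the 3x3 board filtered by target parity: 'r' = adjacent even squares, 'b' = adjacent odd squares, ascending), and replaces the recursive DFS with an iterative level-by-level frontier expansion.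
import Mathlib
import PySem

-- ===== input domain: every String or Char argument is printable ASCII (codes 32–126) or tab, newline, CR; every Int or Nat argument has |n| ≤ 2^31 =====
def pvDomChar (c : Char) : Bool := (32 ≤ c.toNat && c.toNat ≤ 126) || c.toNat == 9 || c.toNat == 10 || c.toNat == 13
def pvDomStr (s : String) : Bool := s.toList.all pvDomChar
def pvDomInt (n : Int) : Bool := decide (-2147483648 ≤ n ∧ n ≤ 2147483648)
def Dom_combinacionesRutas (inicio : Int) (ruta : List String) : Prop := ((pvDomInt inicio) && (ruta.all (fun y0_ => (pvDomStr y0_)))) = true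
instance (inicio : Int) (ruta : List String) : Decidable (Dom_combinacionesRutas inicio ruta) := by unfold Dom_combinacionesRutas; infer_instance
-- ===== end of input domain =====

-- B drops the transition table entirely: moves are computed arithmetically (king-adjacency on the
-- 3x3 board restricted by parity) inside an iterative frontier expansion; same output, same order.

-- ===== PORT A =====
-- tablaEstados[s][c]; returns [] where the Python dict lookup would raise KeyError (excluded by Pre_)
def tablaEstados (s : Int) (c : String) : List Int :=
  if c = "r" then
    if s = 1 then [2, 4] else if s = 2 then [4, 6] else if s = 3 then [2, 6]
    else if s = 4 then [2, 8] else if s = 5 then [2, 4, 6, 8] else if s = 6 then [2, 8]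
    else if s = 7 then [4, 8] else if s = 8 then [4, 6] else if s = 9 then [6, 8] else []
  else if c = "b" then
    if s = 1 then [5] else if s = 2 then [1, 3, 5] else if s = 3 then [5]
    else if s = 4 then [1, 5, 7] else if s = 5 then [1, 3, 7, 9] else if s = 6 then [3, 5, 9]
    else if s = 7 then [5] else if s = 8 then [5, 7, 9] else if s = 9 then [5] else []
  else []

def combinacionesRutas (inicio : Int) (ruta : List String) : List (List Int) :=
  match ruta with
  | [] => [[inicio]]
  | primero :: nueva_ruta =>
    (tablaEstados inicio primero).foldl
      (fun combinaciones estado =>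
        combinaciones ++ (combinacionesRutas estado nueva_ruta).map (fun r => inicio :: r))
      []

-- ===== PORT B =====
-- paridad[color]; 0 where the Python dict lookup would raise KeyError (excluded by Pre_)
def pvParidad (color : String) : Int :=
  (PySem.Dict.get? (PySem.Dict.ofList [("r", (0 : Int)), ("b", 1)]) color).getD 0

-- the inner 'for n in range(1, 10)' comprehension: king-adjacent squares of s with parity 'want'
def pvVecinos (s want : Int) : List Int :=
  let fila := PySem.Int.floordiv (s - 1) 3
  let col := PySem.Int.mod (s - 1) 3
  (PySem.List.pyRange 1 10 1).filter (fun n =>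
    decide (PySem.Int.mod n 2 = want ∧ n ≠ s ∧
      (PySem.Int.floordiv (n - 1) 3 - fila).natAbs ≤ 1 ∧
      (PySem.Int.mod (n - 1) 3 - col).natAbs ≤ 1))

-- the body of B's 'for color in ruta' loop: expand every partial path by one move
def pvStepB (frontier : List (List Int)) (color : String) : List (List Int) :=
  frontier.flatMap (fun p =>
    (pvVecinos ((PySem.List.pyGet? p (-1)).getD 0) (pvParidad color)).map (fun n => p ++ [n]))

def combinacionesRutas_alt (inicio : Int) (ruta : List String) : List (List Int) :=
  ruta.foldl pvStepB [[inicio]]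

-- ===== PRECONDITION & SPEC =====
-- Pre_ excludes exactly the inputs on which the Python A raises KeyError: a nonempty ruta with a
-- start node outside 1..9 or a color other than 'r'/'b'.
def Pre_combinacionesRutas (inicio : Int) (ruta : List String) : Prop :=
  ruta = [] ∨ (1 ≤ inicio ∧ inicio ≤ 9 ∧ ∀ c ∈ ruta, c = "r" ∨ c = "b")
instance (inicio : Int) (ruta : List String) : Decidable (Pre_combinacionesRutas inicio ruta) := by
  unfold Pre_combinacionesRutas; infer_instance
def pvWitness_combinacionesRutas : Int × List String := (5, ["r", "b"])

def Spec_combinacionesRutas (inicio : Int) (ruta : List String) (out : List (List Int)) : Prop := out = combinacionesRutas_alt inicio ruta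
instance (inicio : Int) (ruta : List String) (out : List (List Int)) : Decidable (Spec_combinacionesRutas inicio ruta out) := by unfold Spec_combinacionesRutas; infer_instance

-- ===== CLAIM (what is proved, stated in full; the proofs are below) =====
def Claim_equal_combinacionesRutas : Prop := ∀ (inicio : Int) (ruta : List String), Dom_combinacionesRutas inicio ruta → Pre_combinacionesRutas inicio ruta → Spec_combinacionesRutas inicio ruta (combinacionesRutas inicio ruta)

-- ===== LEMMAS AND PROOFS =====

-- on the valid domain, B's arithmetic move computation reproduces A's table row
theorem vecinos_eq_tabla (s : Int) (h1 : 1 ≤ s) (h9 : s ≤ 9) (c : String)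
    (hc : c = "r" ∨ c = "b") :
    pvVecinos s (pvParidad c) = tablaEstados s c := by
  rcases hc with hc | hc <;> subst hc <;> interval_cases s <;> decide

-- every table entry is again a valid square
set_option maxHeartbeats 1000000 in
theorem tabla_mem_bounds (s : Int) (c : String) (e : Int) (he : e ∈ tablaEstados s c) :
    1 ≤ e ∧ e ≤ 9 := by
  unfold tablaEstados at he
  split_ifs at he <;>
    simp only [List.mem_cons, List.not_mem_nil, or_false] at he <;> omega

theorem pvStepB_append (F G : List (List Int)) (c : String) :
    pvStepB (F ++ G) c = pvStepB F c ++ pvStepB G c := by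
  simp [pvStepB]

theorem foldl_pvStepB_append (cs : List String) (F G : List (List Int)) :
    cs.foldl pvStepB (F ++ G) = cs.foldl pvStepB F ++ cs.foldl pvStepB G := by
  induction cs generalizing F G with
  | nil => rfl
  | cons c cs ih => simp only [List.foldl_cons, pvStepB_append, ih]

theorem foldl_pvStepB_map (cs : List String) (l : List Int) (g : Int → List Int) :
    cs.foldl pvStepB (l.map g) = l.flatMap (fun e => cs.foldl pvStepB [g e]) := by
  induction l with
  | nil =>
    induction cs with
    | nil => rfl
    | cons c cs ih => simpa [pvStepB] using ih
  | cons a l ih =>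
    have : (a :: l).map g = [g a] ++ l.map g := by simp
    rw [this, foldl_pvStepB_append, ih, List.flatMap_cons]

theorem combinacionesRutas_cons (s : Int) (c : String) (cs : List String) :
    combinacionesRutas s (c :: cs) =
      (tablaEstados s c).flatMap (fun e => (combinacionesRutas e cs).map (fun r => s :: r)) := by
  rw [combinacionesRutas]
  rw [PySem.List.foldl_append_eq_flatMap]
  simp

theorem foldl_pvStepB_single (cs : List String) (q : List Int) (s : Int)
    (h1 : 1 ≤ s) (h9 : s ≤ 9) (hcs : ∀ c ∈ cs, c = "r" ∨ c = "b") :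
    cs.foldl pvStepB [q ++ [s]] = (combinacionesRutas s cs).map (fun r => q ++ r) := by
  induction cs generalizing q s with
  | nil => simp [combinacionesRutas]
  | cons c cs ih =>
    have hstep : pvStepB [q ++ [s]] c
        = (tablaEstados s c).map (fun e => (q ++ [s]) ++ [e]) := by
      rw [pvStepB]
      simp only [List.flatMap_cons, List.flatMap_nil, List.append_nil,
        PySem.List.pyGet?_neg_one_append_singleton, Option.getD_some]
      rw [vecinos_eq_tabla s h1 h9 c (hcs c (by simp))]
    rw [List.foldl_cons, hstep, foldl_pvStepB_map, combinacionesRutas_cons]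
    simp only [List.map_flatMap, List.map_map]
    apply List.flatMap_congr
    intro e he
    obtain ⟨he1, he9⟩ := tabla_mem_bounds s c e he
    rw [ih (q ++ [s]) e he1 he9 (fun d hd => hcs d (by simp [hd]))]
    simp

-- ===== VERDICT (by name: the statement is the Claim_ definition above) =====
theorem combinacionesRutas_spec : Claim_equal_combinacionesRutas := by
  intro inicio ruta _ hpre
  unfold Spec_combinacionesRutas combinacionesRutas_alt
  rcases hpre with h | ⟨h1, h9, hall⟩
  · subst h; rfl
  · have := foldl_pvStepB_single ruta [] inicio h1 h9 hall
    simpa using this.symm
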